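-- pv_equiv track=rewrite | github.com/allenlam465/File-Transfer | ascii_armor.py | mime_decode
-- ===== SOURCE A (Python) =====
-- mime_values = ["A", "B", "C", "D", "E", "F", "G", "H", "I",
--                "J", "K", "L", "M", "N", "O", "P", "Q", "R",
--                "S", "T", "U", "V", "W", "X", "Y", "Z", "a",
--                "b", "c", "d", "e", "f", "g", "h", "i", "j",
--                "k", "l", "m", "n", "o", "p", "q", "r", "s",
--                "t", "u", "v", "w", "x", "y", "z", "0", "1",
--                "2", "3", "4", "5", "6", "7", "8", "9", "+",
--                "/"]
--
-- hex_values = ["a", "b", "c", "d", "e", "f"]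
--
-- def mime_decode(str_input):
--     ret = ""
--     bits = ""
--     # read each ASCII char
--     for c in str_input:
--         # get byte-integer representation of the MIME char
--         b = mime_values.index(c)
--         # convert that int to binary
--         bits += int_to_bits(b)[2:]
--     # pad input to be div by 8
--     while len(bits) % 8 != 0:
--         bits += "0"
--     while len(bits) > 0:
--         # decode 8 bits at a time
--         eight_bits = int(bits[:8])
--         # get hex representation of byte
--         ret += binary_to_hex(eight_bits) + " "
--         # substring bits for next 8
--         bits = bits[8:]
--     last_byte = ret[len(ret) - 4:]
--     if last_byte.strip() == "00":
--         return ret[:len(ret) - 4]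
--     else:
--         return ret
--
-- def int_to_bits(int_input):
--     bits_value = ''
--     # convert int to bits, max range 8 bits
--     for i in range(8):
--         remainder = int_input % 2
--         int_input = int_input // 2
--         bits_value += str(remainder)
--
--     # reverse order
--     return bits_value[::-1]
--
-- def binary_to_hex(bin_input):
--     hex_ints = [1, 2, 4, 8]
--     hex_val0 = 0
--     hex_val1 = 0
--
--     # convert int to hex
--     for i in range(8):
--         if i > 3:
--             j = i - 4
--         else:
--             j = i
--         if bin_input % 10 == 1:
--             if i < 4:
--                 hex_val0 += hex_ints[j]
--             else:
--                 hex_val1 += hex_ints[j]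
--         bin_input = bin_input // 10
--         hex_string = ""
--         if hex_val1 > 9:
--             hex_string += hex_values[hex_val1 - 10]
--         else:
--             hex_string += str(hex_val1)
--         if hex_val0 > 9:
--             hex_string += hex_values[hex_val0 - 10]
--         else:
--             hex_string += str(hex_val0)
--     return hex_string
-- ===== SOURCE B (Python) =====
-- mime_values = ["A", "B", "C", "D", "E", "F", "G", "H", "I",
--                "J", "K", "L", "M", "N", "O", "P", "Q", "R",
--                "S", "T", "U", "V", "W", "X", "Y", "Z", "a",
--                "b", "c", "d", "e", "f", "g", "h", "i", "j",
--                "k", "l", "m", "n", "o", "p", "q", "r", "s",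
--                "t", "u", "v", "w", "x", "y", "z", "0", "1",
--                "2", "3", "4", "5", "6", "7", "8", "9", "+",
--                "/"]
--
-- def mime_decode(str_input):
--     # single pass with an integer bit buffer instead of a binary string
--     buf = 0
--     nbits = 0
--     out = []
--     for c in str_input:
--         buf = buf * 64 + mime_values.index(c)   # ValueError on non-alphabet chars, like A
--         nbits += 6
--         if nbits >= 8:
--             nbits -= 8
--             out.append('%02x ' % (buf >> nbits))
--             buf %= 1 << nbits
--     if nbits > 0:
--         out.append('%02x ' % (buf << (8 - nbits)))
--     ret = ''.join(out)
--     last_byte = ret[len(ret) - 4:]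
--     if last_byte.strip() == "00":
--         return ret[:len(ret) - 4]
--     return ret
-- ===== Notes on version B (the rewrite author's own statement) =====
-- stated objective: faster
-- what changed: Replaces A's build-a-giant-binary-string pipeline (8-bit string per char, pad loop, repeated string slicing, decimal-digit trickery to re-read each byte) with a single pass keeping an integer bit buffer and bit count, emitting each byte with '%02x' as it completes; the final trailing-'00' slice rule is kept exactly.
import Mathlib
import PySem

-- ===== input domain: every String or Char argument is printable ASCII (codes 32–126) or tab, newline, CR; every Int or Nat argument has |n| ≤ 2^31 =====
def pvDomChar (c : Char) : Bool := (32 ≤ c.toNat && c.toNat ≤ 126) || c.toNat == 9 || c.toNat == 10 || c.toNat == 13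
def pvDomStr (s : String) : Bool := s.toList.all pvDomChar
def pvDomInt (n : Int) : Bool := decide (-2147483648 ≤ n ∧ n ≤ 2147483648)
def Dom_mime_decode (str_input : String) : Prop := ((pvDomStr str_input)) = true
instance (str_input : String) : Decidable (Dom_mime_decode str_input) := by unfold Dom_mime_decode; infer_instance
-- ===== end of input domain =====

-- B changes the algorithm: one pass with an integer bit buffer instead of A's quadratic
-- binary-string pipeline (measured faster); the trailing-'00' slice rule is unchanged.
-- Both Pythons raise ValueError on characters outside the MIME alphabet; Pre_ excludes those.

-- ===== PORT A =====
-- module constant mime_values (64 one-character strings, modelled as chars)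
def mimeChars : List Char :=
  ['A','B','C','D','E','F','G','H','I','J','K','L','M','N','O','P','Q','R','S','T','U','V','W','X','Y','Z',
   'a','b','c','d','e','f','g','h','i','j','k','l','m','n','o','p','q','r','s','t','u','v','w','x','y','z',
   '0','1','2','3','4','5','6','7','8','9','+','/']

-- module constant hex_values
def hexValues : List Char := ['a','b','c','d','e','f']

-- the common final four lines of both Pythons: last_byte = ret[len(ret)-4:];
-- if last_byte.strip() == "00": return ret[:len(ret)-4] else return ret
def finalizeRet (ret : List Char) : String :=
  let last_byte := PySem.Chars.strip (PySem.List.slice ret (some ((ret.length : Int) - 4)) none)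
  if last_byte = ['0','0'] then
    String.ofList (PySem.List.slice ret none (some ((ret.length : Int) - 4)))
  else
    String.ofList ret

-- def int_to_bits(int_input): 8-step remainder loop, then reversed
def int_to_bits (int_input : Int) : List Char :=
  let st := (PySem.List.pyRange 0 8 1).foldl
    (fun (st : Int × List Char) _ =>
      let remainder := PySem.Int.mod st.1 2
      let n := PySem.Int.floordiv st.1 2
      (n, st.2 ++ PySem.Int.toChars remainder))
    (int_input, [])
  -- bits_value[::-1]
  (PySem.List.slice? st.2 none none (-1)).getD []

-- def binary_to_hex(bin_input): reads the byte back from its DECIMAL digits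
def binary_to_hex (bin_input : Int) : List Char :=
  let hex_ints : List Int := [1, 2, 4, 8]
  let st := (PySem.List.pyRange 0 8 1).foldl
    (fun (st : Int × Int × Int × List Char) i =>
      let (bin, hv0, hv1, _) := st
      let j := if i > 3 then i - 4 else i
      let p :=
        if PySem.Int.mod bin 10 = 1 then
          if i < 4 then (hv0 + (PySem.List.pyGet? hex_ints j).getD 0, hv1)
          else (hv0, hv1 + (PySem.List.pyGet? hex_ints j).getD 0)
        else (hv0, hv1)
      let bin := PySem.Int.floordiv bin 10
      let hs : List Char :=
        (if p.2 > 9 then [(PySem.List.pyGet? hexValues (p.2 - 10)).getD ' ']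
         else PySem.Int.toChars p.2) ++
        (if p.1 > 9 then [(PySem.List.pyGet? hexValues (p.1 - 10)).getD ' ']
         else PySem.Int.toChars p.1)
      (bin, p.1, p.2, hs))
    (bin_input, 0, 0, [])
  st.2.2.2

-- termination measures of the two while loops (cited by the ports' decreasing_by)
theorem pad_arith : ∀ r : Nat, r < 8 → r ≠ 0 → (8 - (r + 1 % 8) % 8) % 8 < (8 - r) % 8 := by
  decide

theorem padLoop_dec (bits : List Char) (h : bits.length % 8 ≠ 0) :
    (8 - (bits ++ ['0']).length % 8) % 8 < (8 - bits.length % 8) % 8 := by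
  have hl : (bits ++ ['0']).length = bits.length + 1 := by simp
  rw [hl, Nat.add_mod]
  exact pad_arith (bits.length % 8) (Nat.mod_lt _ (by decide)) h

theorem chunkLoop_dec (bits : List Char) (h : bits.length > 0) :
    (PySem.List.slice bits (some 8) none).length < bits.length := by
  have hs := PySem.List.slice_from (xs := bits) (a := (8:Int)) (by decide)
  rw [hs, List.length_drop]
  exact Nat.sub_lt h (by decide)

-- while len(bits) % 8 != 0: bits += "0"
def padLoop (bits : List Char) : List Char :=
  if h : bits.length % 8 ≠ 0 then padLoop (bits ++ ['0']) else bits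
termination_by (8 - bits.length % 8) % 8
decreasing_by exact padLoop_dec bits h

-- while len(bits) > 0: eight_bits = int(bits[:8]); ret += binary_to_hex(eight_bits) + " "; bits = bits[8:]
def chunkLoop (bits ret : List Char) : List Char :=
  if h : bits.length > 0 then
    -- int() never raises here: bits consists of '0'/'1' chars
    let eight_bits := (PySem.Int.ofChars? (PySem.List.slice bits none (some 8))).getD 0
    chunkLoop (PySem.List.slice bits (some 8) none) (ret ++ binary_to_hex eight_bits ++ [' '])
  else ret
termination_by bits.length
decreasing_by exact chunkLoop_dec bits h

def mime_decode (str_input : String) : String :=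
  let bits := str_input.toList.foldl
    (fun bits c =>
      -- mime_values.index(c); ValueError on a char outside the alphabet is excluded by Pre_
      let b : Int := ((PySem.List.index? mimeChars c).getD 0 : Nat)
      bits ++ PySem.List.slice (int_to_bits b) (some 2) none)
    []
  let bits := padLoop bits
  let ret := chunkLoop bits []
  finalizeRet ret

-- ===== PORT B =====
def hexDigits : List Char := ['0','1','2','3','4','5','6','7','8','9','a','b','c','d','e','f']

-- '%02x ' % b, exact for 0 ≤ b < 256 (the only values B formats)
def pct02x (b : Int) : List Char :=
  [(PySem.List.pyGet? hexDigits (PySem.Int.floordiv b 16)).getD '0',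
   (PySem.List.pyGet? hexDigits (PySem.Int.mod b 16)).getD '0', ' ']

def mime_decode_alt (str_input : String) : String :=
  let st := str_input.toList.foldl
    (fun (st : Int × Int × List (List Char)) c =>
      let (buf, nbits, out) := st
      -- mime_values.index(c); ValueError on a char outside the alphabet is excluded by Pre_
      let buf := buf * 64 + ((PySem.List.index? mimeChars c).getD 0 : Nat)
      let nbits := nbits + 6
      if nbits ≥ 8 then
        let nbits := nbits - 8
        -- shift amounts are nonnegative throughout, so .toNat is exact
        let out := out ++ [pct02x (buf >>> nbits.toNat)]
        (PySem.Int.mod buf (1 <<< nbits.toNat), nbits, out)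
      else (buf, nbits, out))
    (0, 0, [])
  let out := if st.2.1 > 0 then st.2.2 ++ [pct02x (st.1 <<< (8 - st.2.1).toNat)] else st.2.2
  let ret := PySem.Chars.join [] out   -- ''.join(out)
  finalizeRet ret

-- ===== PRECONDITION & SPEC =====
-- Pre_ excludes exactly the inputs with a character outside the 64-char MIME alphabet,
-- on which A's mime_values.index(c) raises ValueError (B raises there too).
def Pre_mime_decode (str_input : String) : Prop :=
  (str_input.toList.all (fun c => mimeChars.contains c)) = true
instance (str_input : String) : Decidable (Pre_mime_decode str_input) := by
  unfold Pre_mime_decode; infer_instance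
def pvWitness_mime_decode : String := "TWFu"

def Spec_mime_decode (str_input : String) (out : String) : Prop := out = mime_decode_alt str_input
instance (str_input : String) (out : String) : Decidable (Spec_mime_decode str_input out) := by
  unfold Spec_mime_decode; infer_instance

-- ===== CLAIM (what is proved, stated in full; the proofs are below) =====
def Claim_equal_mime_decode : Prop := ∀ (str_input : String), Dom_mime_decode str_input → Pre_mime_decode str_input → Spec_mime_decode str_input (mime_decode str_input)

-- ===== LEMMAS AND PROOFS =====

-- abstract model: bit lists, shared by both reductions
def digitC (b : Nat) : Char := if b = 1 then '1' else '0'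

def natBits : Nat → Nat → List Nat
  | _, 0 => []
  | n, k + 1 => natBits (n / 2) k ++ [n % 2]

def valBits (l : List Nat) : Nat := l.foldl (fun a b => 2 * a + b) 0

def padTo8 (l : List Nat) : List Nat := l ++ List.replicate ((8 - l.length % 8) % 8) 0

def chunk8 : List Nat → List Nat
  | [] => []
  | x :: xs => valBits ((x :: xs).take 8) :: chunk8 ((x :: xs).drop 8)
termination_by l => l.length
decreasing_by simp

def emitN : Nat → Nat → List Nat → List Nat
  | buf, nbits, [] => if 0 < nbits then [buf * 2 ^ (8 - nbits)] else []
  | buf, nbits, v :: vs =>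
    let b := buf * 64 + v
    if 8 ≤ nbits + 6 then
      b / 2 ^ (nbits - 2) :: emitN (b % 2 ^ (nbits - 2)) (nbits - 2) vs
    else emitN b (nbits + 6) vs

def hex2 (x : Nat) : List Char := [hexDigits.getD (x / 16) '0', hexDigits.getD (x % 16) '0']

def render (bytes : List Nat) : List Char := (bytes.map (fun b => hex2 b ++ [' '])).flatten

def bytesSpec (vals : List Nat) : List Nat := chunk8 (padTo8 (vals.flatMap (fun v => natBits v 6)))

-- basic natBits facts
theorem length_natBits (n k : Nat) : (natBits n k).length = k := by
  induction k generalizing n with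
  | zero => rfl
  | succ k ih => simp [natBits, ih]

theorem mem_natBits_le_one (n k : Nat) : ∀ b ∈ natBits n k, b ≤ 1 := by
  induction k generalizing n with
  | zero => simp [natBits]
  | succ k ih =>
    simp only [natBits, List.mem_append, List.mem_singleton]
    rintro b (h | rfl)
    · exact ih _ _ h
    · omega

theorem natBits_zero_eq (k : Nat) : natBits 0 k = List.replicate k 0 := by
  induction k with
  | zero => rfl
  | succ k ih => simp [natBits, ih, List.replicate_succ' ]

theorem natBits_split (a b k m : Nat) (hb : b < 2 ^ k) :
    natBits (a * 2 ^ k + b) (m + k) = natBits a m ++ natBits b k := by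
  induction k generalizing b with
  | zero =>
    have hb0 : b = 0 := by simpa using hb
    simp [hb0, natBits]
  | succ k ih =>
    have key : a * 2 ^ (k + 1) + b = 2 * (a * 2 ^ k) + b := by ring
    have hdiv : (a * 2 ^ (k + 1) + b) / 2 = a * 2 ^ k + b / 2 := by
      rw [key]; omega
    have hmod : (a * 2 ^ (k + 1) + b) % 2 = b % 2 := by
      rw [key]; omega
    have hb2 : b / 2 < 2 ^ k := by
      have : (2:Nat) ^ (k + 1) = 2 * 2 ^ k := by ring
      omega
    show natBits (a * 2 ^ (k + 1) + b) ((m + k) + 1) = _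
    simp only [natBits, hdiv, hmod, ih _ hb2, List.append_assoc]

theorem valBits_append_singleton (l : List Nat) (b : Nat) :
    valBits (l ++ [b]) = 2 * valBits l + b := by
  simp [valBits, List.foldl_append]

theorem valBits_natBits (k n : Nat) (h : n < 2 ^ k) : valBits (natBits n k) = n := by
  induction k generalizing n with
  | zero => simp [natBits, valBits]; omega
  | succ k ih =>
    have hp : 2 ^ (k + 1) = 2 * 2 ^ k := by ring
    have h2 : n / 2 < 2 ^ k := by omega
    simp only [natBits, valBits_append_singleton, ih _ h2]
    omega

theorem natBits_valBits (l : List Nat) (h : ∀ b ∈ l, b ≤ 1) :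
    natBits (valBits l) l.length = l := by
  induction l using List.reverseRecOn with
  | nil => rfl
  | append_singleton l b ih =>
    have hb : b ≤ 1 := h b (by simp)
    have hl : ∀ x ∈ l, x ≤ 1 := fun x hx => h x (by simp [hx])
    have hv := valBits_append_singleton l b
    simp only [List.length_append, List.length_singleton, natBits, hv]
    have h1 : (2 * valBits l + b) / 2 = valBits l := by omega
    have h2 : (2 * valBits l + b) % 2 = b := by omega
    rw [h1, h2, ih hl]

theorem valBits_lt (l : List Nat) (h : ∀ b ∈ l, b ≤ 1) : valBits l < 2 ^ l.length := by
  induction l using List.reverseRecOn with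
  | nil => simp [valBits]
  | append_singleton l b ih =>
    have hb : b ≤ 1 := h b (by simp)
    have hl : ∀ x ∈ l, x ≤ 1 := fun x hx => h x (by simp [hx])
    have := ih hl
    simp only [valBits_append_singleton, List.length_append, List.length_singleton, pow_succ]
    omega

theorem chunk8_cons8 (l8 rest : List Nat) (h : l8.length = 8) :
    chunk8 (l8 ++ rest) = valBits l8 :: chunk8 rest := by
  match l8, h with
  | x :: xs, h =>
    have hx : xs.length = 7 := by simpa using h
    rw [List.cons_append, chunk8]
    rw [← List.cons_append, List.take_append_of_le_length (by simp [hx]),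
        List.drop_append_of_le_length (by simp [hx])]
    have hx : (x :: xs).take 8 = x :: xs := List.take_of_length_le (by omega)
    have hd : (x :: xs).drop 8 = [] := List.drop_of_length_le (by omega)
    rw [hx, hd]; simp

theorem padTo8_append8 (a z : List Nat) (h : a.length % 8 = 0) :
    padTo8 (a ++ z) = a ++ padTo8 z := by
  unfold padTo8
  have : (a.length + z.length) % 8 = z.length % 8 := by omega
  simp [this]

-- per-value facts about the ports, discharged by evaluation
theorem int_to_bits_slice : ∀ v : Nat, v < 64 →
    PySem.List.slice (int_to_bits (v : Int)) (some 2) none = (natBits v 6).map digitC := by decide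

set_option maxHeartbeats 4000000 in
set_option maxRecDepth 20000 in
theorem binary_to_hex_byte : ∀ x : Nat, x < 256 →
    binary_to_hex ((PySem.Int.ofChars? ((natBits x 8).map digitC)).getD 0) = hex2 x := by decide

set_option maxRecDepth 20000 in
theorem pct02x_eq : ∀ x : Nat, x < 256 → pct02x (x : Int) = hex2 x ++ [' '] := by decide

theorem idx_lt (c : Char) : (PySem.List.index? mimeChars c).getD 0 < 64 := by
  cases h : PySem.List.index? mimeChars c with
  | none => simp
  | some k =>
    obtain ⟨hk, -, -⟩ := PySem.List.getElem_of_index?_eq_some h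
    simp [mimeChars] at hk
    simpa using hk

-- A-side reductions
theorem padLoop_eq (l : List Char) :
    padLoop l = l ++ List.replicate ((8 - l.length % 8) % 8) '0' := by
  fun_induction padLoop l with
  | case1 l hne ih =>
    rw [ih]
    have harith : (8 - (l ++ ['0']).length % 8) % 8 + 1 = (8 - l.length % 8) % 8 := by
      simp only [List.length_append, List.length_singleton]
      omega
    rw [← harith, List.append_assoc]
    congr 1
  | case2 l hl =>
    have : l.length % 8 = 0 := by omega
    simp [this]

theorem chunkLoop_eq (l : List Nat) (h8 : l.length % 8 = 0) (h1 : ∀ b ∈ l, b ≤ 1) (ret : List Char) :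
    chunkLoop (l.map digitC) ret = ret ++ render (chunk8 l) := by
  induction hn : l.length using Nat.strong_induction_on generalizing l ret with
  | _ n ih =>
  cases l with
  | nil => rw [chunkLoop]; simp [chunk8, render]
  | cons x xs =>
    have hlen : 8 ≤ (x :: xs).length := by
      have := h8; simp at this ⊢; omega
    set L := x :: xs with hL
    have hl8len : (L.take 8).length = 8 := by simp [hlen]
    have hbits8 : ∀ b ∈ L.take 8, b ≤ 1 := fun b hb => h1 b (List.mem_of_mem_take hb)
    have hxv : natBits (valBits (L.take 8)) 8 = L.take 8 := by
      have := natBits_valBits (L.take 8) hbits8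
      rw [hl8len] at this; exact this
    have hv : valBits (L.take 8) < 256 := by
      have := valBits_lt (L.take 8) hbits8
      rw [hl8len] at this; exact this
    have hsl1 := PySem.List.slice_to (xs := L.map digitC) (b := (8:Int)) (by norm_num)
    have hsl2 := PySem.List.slice_from (xs := L.map digitC) (a := (8:Int)) (by norm_num)
    rw [chunkLoop, dif_pos (by simp [hL])]
    show chunkLoop (PySem.List.slice (L.map digitC) (some 8) none)
        (ret ++ binary_to_hex ((PySem.Int.ofChars? (PySem.List.slice (L.map digitC) none (some 8))).getD 0)
          ++ [' ']) = ret ++ render (chunk8 L)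
    rw [hsl1, hsl2]
    have htk : (L.map digitC).take (8:Int).toNat = (L.take 8).map digitC := by
      simp [List.map_take]
    have hdp : (L.map digitC).drop (8:Int).toNat = (L.drop 8).map digitC := by
      simp [List.map_drop]
    rw [htk, hdp]
    have hbh : binary_to_hex ((PySem.Int.ofChars? ((L.take 8).map digitC)).getD 0)
        = hex2 (valBits (L.take 8)) := by
      conv_lhs => rw [← hxv]
      exact binary_to_hex_byte _ hv
    rw [hbh]
    have hrest8 : (L.drop 8).length % 8 = 0 := by simp; omega
    have hrest1 : ∀ b ∈ L.drop 8, b ≤ 1 := fun b hb => h1 b (List.mem_of_mem_drop hb)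
    have hlt : (L.drop 8).length < n := by simp [← hn]; omega
    rw [ih _ hlt _ hrest8 hrest1 _ rfl]
    have hchunk : chunk8 L = valBits (L.take 8) :: chunk8 (L.drop 8) := by
      conv_lhs => rw [← List.take_append_drop 8 L]
      exact chunk8_cons8 _ _ hl8len
    rw [hchunk]
    simp [render]

theorem flatMap_bits_le_one (vals : List Nat) :
    ∀ b ∈ vals.flatMap (fun v => natBits v 6), b ≤ 1 := by
  intro b hb
  obtain ⟨v, -, hv⟩ := List.mem_flatMap.mp hb
  exact mem_natBits_le_one _ _ _ hv

theorem padTo8_mod (l : List Nat) : (padTo8 l).length % 8 = 0 := by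
  simp [padTo8]; omega

theorem padTo8_le_one (l : List Nat) (h : ∀ b ∈ l, b ≤ 1) : ∀ b ∈ padTo8 l, b ≤ 1 := by
  intro b hb
  rcases List.mem_append.mp hb with h' | h'
  · exact h b h'
  · simp [List.eq_of_mem_replicate h']

theorem padLoop_map (B : List Nat) : padLoop (B.map digitC) = (padTo8 B).map digitC := by
  rw [padLoop_eq]
  simp [padTo8, List.map_replicate]
  exact Or.inr rfl

theorem mime_decode_eq (s : String) :
    mime_decode s = finalizeRet
      (render (bytesSpec (s.toList.map (fun c => (PySem.List.index? mimeChars c).getD 0)))) := by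
  unfold mime_decode
  show finalizeRet (chunkLoop (padLoop (s.toList.foldl
      (fun bits c => bits ++ PySem.List.slice
        (int_to_bits (((PySem.List.index? mimeChars c).getD 0 : Nat) : Int)) (some 2) none) [])) []) = _
  have hfold := PySem.List.foldl_append_eq_flatMap
    (l := s.toList)
    (g := fun c => PySem.List.slice
      (int_to_bits (((PySem.List.index? mimeChars c).getD 0 : Nat) : Int)) (some 2) none)
    (acc := [])
  rw [hfold, List.nil_append]
  have hgs : (fun c => PySem.List.slice
      (int_to_bits (((PySem.List.index? mimeChars c).getD 0 : Nat) : Int)) (some 2) none)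
      = fun c => (natBits ((PySem.List.index? mimeChars c).getD 0) 6).map digitC := by
    funext c
    exact int_to_bits_slice _ (idx_lt c)
  rw [hgs]
  have hflat : s.toList.flatMap (fun c => (natBits ((PySem.List.index? mimeChars c).getD 0) 6).map digitC)
      = ((s.toList.map (fun c => (PySem.List.index? mimeChars c).getD 0)).flatMap
          (fun v => natBits v 6)).map digitC := by
    simp [List.map_flatMap, List.flatMap_map]
  rw [hflat, padLoop_map]
  rw [chunkLoop_eq _ (padTo8_mod _) (padTo8_le_one _ (flatMap_bits_le_one _)) []]
  rw [List.nil_append]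
  rfl

-- B-side reductions
theorem mul_pow_lt (buf nbits k : Nat) (hb : buf < 2 ^ nbits) :
    buf * 2 ^ k < 2 ^ (nbits + k) := by
  have hpos : 0 < 2 ^ k := Nat.two_pow_pos k
  calc buf * 2 ^ k < 2 ^ nbits * 2 ^ k := by
        exact (Nat.mul_lt_mul_right hpos).mpr hb
    _ = 2 ^ (nbits + k) := by rw [pow_add]

theorem emitN_eq (vs : List Nat) (h64 : ∀ v ∈ vs, v < 64) (buf nbits : Nat)
    (hn : nbits < 8) (hb : buf < 2 ^ nbits) :
    emitN buf nbits vs = chunk8 (padTo8 (natBits buf nbits ++ vs.flatMap (fun v => natBits v 6))) := by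
  induction vs generalizing buf nbits with
  | nil =>
    simp only [List.flatMap_nil, List.append_nil, emitN]
    by_cases h0 : 0 < nbits
    · rw [if_pos h0]
      have hlen : (natBits buf nbits).length = nbits := length_natBits _ _
      have hpc : (8 - (natBits buf nbits).length % 8) % 8 = 8 - nbits := by rw [hlen]; omega
      unfold padTo8
      rw [hpc, ← natBits_zero_eq]
      have hsp := natBits_split buf 0 (8 - nbits) nbits (Nat.two_pow_pos _)
      rw [Nat.add_zero] at hsp
      rw [← hsp, show nbits + (8 - nbits) = 8 by omega]
      have hlt : buf * 2 ^ (8 - nbits) < 256 := by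
        have := mul_pow_lt buf nbits (8 - nbits) hb
        rw [show nbits + (8 - nbits) = 8 by omega] at this
        simpa using this
      rw [← List.append_nil (natBits (buf * 2 ^ (8 - nbits)) 8),
          chunk8_cons8 _ _ (length_natBits _ _)]
      rw [valBits_natBits 8 _ (by simpa using hlt)]
      simp [chunk8]
    · have hn0 : nbits = 0 := by omega
      have hbuf0 : buf = 0 := by subst hn0; simpa using hb
      subst hn0 hbuf0
      rw [if_neg h0]
      simp [natBits, padTo8, chunk8]
  | cons v vs ih =>
    have hv : v < 64 := h64 v (by simp)
    have hsplit : natBits (buf * 64 + v) (nbits + 6) = natBits buf nbits ++ natBits v 6 := by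
      have := natBits_split buf v 6 nbits (by norm_num; omega)
      simpa using this
    have hbb : buf * 64 + v < 2 ^ (nbits + 6) := by
      have h64e : (2:Nat) ^ (nbits + 6) = 64 * 2 ^ nbits := by
        rw [pow_add]; ring
      omega
    rw [List.flatMap_cons, ← List.append_assoc, ← hsplit]
    simp only [emitN]
    by_cases h8 : 8 ≤ nbits + 6
    · rw [if_pos h8]
      have hnb2 : nbits - 2 < 8 := by omega
      have hmodlt : (buf * 64 + v) % 2 ^ (nbits - 2) < 2 ^ (nbits - 2) :=
        Nat.mod_lt _ (Nat.two_pow_pos _)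
      have hdivlt : (buf * 64 + v) / 2 ^ (nbits - 2) < 256 := by
        have h28 : (2:Nat) ^ (nbits + 6) = 2 ^ (nbits - 2) * 256 := by
          rw [show nbits + 6 = (nbits - 2) + 8 by omega, pow_add]
          norm_num
        rw [Nat.div_lt_iff_lt_mul (Nat.two_pow_pos _)]
        calc buf * 64 + v < 2 ^ (nbits + 6) := hbb
          _ = 256 * 2 ^ (nbits - 2) := by rw [h28]; ring
      have hsplit2 : natBits (buf * 64 + v) (nbits + 6)
          = natBits ((buf * 64 + v) / 2 ^ (nbits - 2)) 8
            ++ natBits ((buf * 64 + v) % 2 ^ (nbits - 2)) (nbits - 2) := by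
        have hsp := natBits_split ((buf * 64 + v) / 2 ^ (nbits - 2))
          ((buf * 64 + v) % 2 ^ (nbits - 2)) (nbits - 2) 8 hmodlt
        have hdm : (buf * 64 + v) / 2 ^ (nbits - 2) * 2 ^ (nbits - 2)
            + (buf * 64 + v) % 2 ^ (nbits - 2) = buf * 64 + v := by
          rw [Nat.mul_comm]; exact Nat.div_add_mod _ _
        rw [hdm, show 8 + (nbits - 2) = nbits + 6 by omega] at hsp
        exact hsp
      rw [hsplit2, List.append_assoc,
          padTo8_append8 _ _ (by rw [length_natBits]),
          chunk8_cons8 _ _ (length_natBits _ _),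
          valBits_natBits 8 _ (by simpa using hdivlt)]
      rw [ih (fun x hx => h64 x (by simp [hx])) _ _ hnb2 hmodlt]
    · rw [if_neg h8]
      exact ih (fun x hx => h64 x (by simp [hx])) _ _ (by omega) hbb

-- proof-only restatement of B's loop body over the already-looked-up alphabet value
def altStep (st : Int × Int × List (List Char)) (v : Nat) : Int × Int × List (List Char) :=
  let (buf, nbits, out) := st
  let buf := buf * 64 + (v : Int)
  let nbits := nbits + 6
  if nbits ≥ 8 then
    let nbits := nbits - 8
    let out := out ++ [pct02x (buf >>> nbits.toNat)]
    (PySem.Int.mod buf (1 <<< nbits.toNat), nbits, out)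
  else (buf, nbits, out)

theorem intCast_shl (B k : Nat) : ((B : Int) <<< k) = ((B <<< k : Nat) : Int) :=
  Int.mem_toNat?.mp rfl

theorem intCast_shr (B k : Nat) : ((B : Int) >>> k) = ((B >>> k : Nat) : Int) :=
  Int.mem_toNat?.mp rfl

theorem join_nil_flatten (parts : List (List Char)) : PySem.Chars.join [] parts = parts.flatten := by
  unfold PySem.Chars.join
  induction parts with
  | nil => simp [List.intercalate, List.intersperse]
  | cons p ps ih =>
    cases ps with
    | nil => simp [List.intercalate, List.intersperse]
    | cons q qs => simp_all [List.intercalate, List.intersperse]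

theorem div_emit_lt (buf v nbits : Nat) (hb : buf < 2 ^ nbits) (hv : v < 64) :
    (buf * 64 + v) / 2 ^ (nbits - 2) < 256 := by
  have hbb : buf * 64 + v < 2 ^ (nbits + 6) := by
    have h64e : (2:Nat) ^ (nbits + 6) = 64 * 2 ^ nbits := by rw [pow_add]; ring
    omega
  rw [Nat.div_lt_iff_lt_mul (Nat.two_pow_pos _)]
  calc buf * 64 + v < 2 ^ (nbits + 6) := hbb
    _ ≤ 256 * 2 ^ (nbits - 2) := by
      rcases Nat.lt_or_ge nbits 2 with h | h
      · interval_cases nbits <;> simp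
      · rw [show nbits + 6 = (nbits - 2) + 8 by omega, pow_add]; ring_nf; omega

theorem altFold_eq (vs : List Nat) (h64 : ∀ v ∈ vs, v < 64) (buf nbits : Nat)
    (hn : nbits < 8) (hb : buf < 2 ^ nbits) (out : List (List Char)) :
    (let st := vs.foldl altStep ((buf : Int), (nbits : Int), out)
     if st.2.1 > 0 then st.2.2 ++ [pct02x (st.1 <<< (8 - st.2.1).toNat)] else st.2.2)
    = out ++ (emitN buf nbits vs).map (fun b => hex2 b ++ [' ']) := by
  induction vs generalizing buf nbits out with
  | nil =>
    simp only [List.foldl_nil, emitN]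
    by_cases h0 : 0 < nbits
    · rw [if_pos (show ((nbits : Nat) : Int) > 0 by exact_mod_cast h0), if_pos h0]
      have htn : ((8 : Int) - ((nbits : Nat) : Int)).toNat = 8 - nbits := by omega
      rw [htn, intCast_shl, Nat.shiftLeft_eq]
      have hlt : buf * 2 ^ (8 - nbits) < 256 := by
        have := mul_pow_lt buf nbits (8 - nbits) hb
        rw [show nbits + (8 - nbits) = 8 by omega] at this
        simpa using this
      rw [pct02x_eq _ hlt]
      simp
    · have hn0 : nbits = 0 := by omega
      subst hn0
      rw [if_neg (by simp), if_neg h0]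
      simp
  | cons v vs ih =>
    have hv : v < 64 := h64 v (by simp)
    have h64' : ∀ x ∈ vs, x < 64 := fun x hx => h64 x (by simp [hx])
    simp only [List.foldl_cons, emitN]
    have hcast : ((buf : Int) * 64 + ((v : Nat) : Int)) = ((buf * 64 + v : Nat) : Int) := by
      push_cast; ring
    by_cases h8 : 8 ≤ nbits + 6
    · have hstep : altStep ((buf : Int), (nbits : Int), out) v
          = ((((buf * 64 + v) % 2 ^ (nbits - 2) : Nat) : Int),
             ((nbits - 2 : Nat) : Int),
             out ++ [pct02x (((buf * 64 + v) / 2 ^ (nbits - 2) : Nat) : Int)]) := by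
        simp only [altStep]
        rw [hcast]
        rw [show ((nbits : Nat) : Int) + 6 = ((nbits + 6 : Nat) : Int) by push_cast; ring]
        rw [if_pos (show ((nbits + 6 : Nat) : Int) ≥ 8 by exact_mod_cast h8)]
        rw [show ((nbits + 6 : Nat) : Int) - 8 = ((nbits - 2 : Nat) : Int) by push_cast; omega]
        rw [show ((nbits - 2 : Nat) : Int).toNat = nbits - 2 by omega]
        rw [intCast_shr, Nat.shiftRight_eq_div_pow]
        rw [Nat.one_shiftLeft, PySem.Int.mod_natCast]
      rw [hstep]
      rw [ih h64' _ _ (by omega) (Nat.mod_lt _ (Nat.two_pow_pos _)) _]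
      rw [if_pos h8]
      rw [pct02x_eq _ (div_emit_lt buf v nbits hb hv)]
      simp [List.append_assoc]
    · have hstep : altStep ((buf : Int), (nbits : Int), out) v
          = (((buf * 64 + v : Nat) : Int), ((nbits + 6 : Nat) : Int), out) := by
        simp only [altStep]
        rw [hcast]
        rw [show ((nbits : Nat) : Int) + 6 = ((nbits + 6 : Nat) : Int) by push_cast; ring]
        rw [if_neg (show ¬ ((nbits + 6 : Nat) : Int) ≥ 8 by exact_mod_cast h8)]
      have hbb : buf * 64 + v < 2 ^ (nbits + 6) := by
        have h64e : (2:Nat) ^ (nbits + 6) = 64 * 2 ^ nbits := by rw [pow_add]; ring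
        omega
      rw [hstep, ih h64' _ _ (by omega) hbb _, if_neg h8]

theorem mime_decode_alt_eq (s : String) :
    mime_decode_alt s = finalizeRet
      (render (bytesSpec (s.toList.map (fun c => (PySem.List.index? mimeChars c).getD 0)))) := by
  unfold mime_decode_alt
  show finalizeRet (PySem.Chars.join []
      (let st := s.toList.foldl (fun st c => altStep st ((PySem.List.index? mimeChars c).getD 0))
        ((0 : Int), (0 : Int), ([] : List (List Char)))
       if st.2.1 > 0 then st.2.2 ++ [pct02x (st.1 <<< (8 - st.2.1).toNat)] else st.2.2)) = _
  rw [← List.foldl_map]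
  have h := altFold_eq (s.toList.map (fun c => (PySem.List.index? mimeChars c).getD 0))
      (by intro v hv; obtain ⟨c, -, rfl⟩ := List.mem_map.mp hv; exact idx_lt c)
      0 0 (by norm_num) (by norm_num) []
  rw [show ((0 : Nat) : Int) = 0 by simp] at h
  rw [h, List.nil_append]
  rw [emitN_eq _ (by intro v hv; obtain ⟨c, -, rfl⟩ := List.mem_map.mp hv; exact idx_lt c)
      0 0 (by norm_num) (by norm_num)]
  rw [join_nil_flatten]
  rfl

-- ===== VERDICT (by name: the statement is the Claim_ definition above) =====
theorem mime_decode_spec : Claim_equal_mime_decode := by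
  intro s _ _
  unfold Spec_mime_decode
  rw [mime_decode_eq, mime_decode_alt_eq]
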